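-- pv_equiv track=rewrite | github.com/domwakeling/CodeWars | src/python/5kyu/mixbonacci.py | mixbonacci
-- ===== SOURCE A (Python) =====
-- class Sequence:
--     def __init__(self, starter, lambda_function):
--         self.items = starter
--         self.function = lambda_function
--         self.next = 0
--
--     def getValue(self):
--         while len(self.items) < (self.next + 1):
--             self.items.append(self.function(self.items))
--         self.next += 1
--         return self.items[self.next - 1]
--
-- def mixbonacci(pattern, length):
--     dict = {
--         'fib' : Sequence([0, 1], lambda s: s[len(s) - 1] + s[len(s) - 2]),
--         'pad' : Sequence([1, 0, 0], lambda s: s[len(s) - 2] + s[len(s) - 3]),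
--         'jac' : Sequence([0, 1], lambda s: s[len(s) - 1] + s[len(s) - 2] * 2),
--         'pel' : Sequence([0, 1], lambda s: s[len(s) - 1] * 2 + s[len(s) - 2]),
--         'tri' : Sequence([0, 0, 1], lambda s: s[len(s) - 1] + s[len(s) - 2] + s[len(s) - 3]),
--         'tet' : Sequence([0, 0, 0, 1], lambda s: s[len(s) - 1] + s[len(s) - 2] + s[len(s) - 3] + s[len(s) - 4])
--     }
--
--     if len(pattern) == 0 or length == 0:
--         return []
--
--     ret = []
--     for i in range(length):
--         ret.append(dict[pattern[i % len(pattern)]].getValue())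
--     return ret
-- ===== SOURCE B (Python) =====
-- # B: two-pass table-based reimplementation — count how many terms each named
-- # sequence needs, generate them once with a generic linear-recurrence generator
-- # driven by a (starter, coefficients) table, then assemble the output with
-- # per-name counters.  Alternative decomposition, same O(length) cost.
--
-- SPECS = {
--     'fib': ([0, 1], [1, 1]),
--     'pad': ([1, 0, 0], [0, 1, 1]),
--     'jac': ([0, 1], [1, 2]),
--     'pel': ([0, 1], [2, 1]),
--     'tri': ([0, 0, 1], [1, 1, 1]),
--     'tet': ([0, 0, 0, 1], [1, 1, 1, 1]),
-- }
--
-- def _terms(start, coeffs, cnt):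
--     seq = list(start)
--     while len(seq) < cnt:
--         seq.append(sum(c * seq[-1 - j] for j, c in enumerate(coeffs)))
--     return seq[:cnt]
--
-- def mixbonacci(pattern, length):
--     if not pattern or length <= 0:
--         return []
--     names = [pattern[i % len(pattern)] for i in range(length)]
--     need = {}
--     for nm in names:
--         need[nm] = need.get(nm, 0) + 1
--     table = {nm: _terms(SPECS[nm][0], SPECS[nm][1], cnt) for nm, cnt in need.items()}
--     used = {nm: 0 for nm in need}
--     out = []
--     for nm in names:
--         k = used[nm]
--         out.append(table[nm][k])
--         used[nm] = k + 1
--     return out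
-- ===== Notes on version B (the rewrite author's own statement) =====
-- stated objective: alternative
-- what changed: A lazily grows six stateful Sequence objects in a dict, extending the needed one on every output position; B is a two-pass table build: it counts how many terms each name needs, generates each needed sequence once with a single generic linear-recurrence generator driven by a (starter, coefficients) table, then assembles the output with per-name counters.
import Mathlib
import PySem

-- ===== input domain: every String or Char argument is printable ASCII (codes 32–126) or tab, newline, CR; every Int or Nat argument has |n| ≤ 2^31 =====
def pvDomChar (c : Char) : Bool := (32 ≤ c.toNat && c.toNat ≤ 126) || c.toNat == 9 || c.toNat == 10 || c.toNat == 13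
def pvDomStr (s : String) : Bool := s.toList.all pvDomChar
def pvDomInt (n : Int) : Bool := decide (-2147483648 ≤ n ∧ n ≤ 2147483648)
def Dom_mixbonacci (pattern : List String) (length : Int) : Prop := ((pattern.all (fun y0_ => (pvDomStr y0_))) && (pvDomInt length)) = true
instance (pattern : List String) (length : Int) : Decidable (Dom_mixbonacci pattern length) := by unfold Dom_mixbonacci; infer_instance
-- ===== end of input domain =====

-- B replaces A's lazily-grown stateful Sequence dict by a two-pass table build
-- (count needed terms per name, generate each sequence once from a generic
-- (starter, coefficients) recurrence table, assemble with per-name counters);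
-- alternative decomposition, same cost, equal return value wherever A returns.

-- ===== PORT A =====

-- getValue's while-loop: append f(items) until len(items) ≥ next+1
def pvGrow (f : List Int → Int) (items : List Int) (next : Nat) : List Int :=
  if items.length < next + 1 then pvGrow f (items ++ [f items]) next else items
termination_by next + 1 - items.length
decreasing_by simp; omega

-- the six lambdas; s[len(s)-k] is ported as getD (in every reachable call the
-- index is in range, where Python's positive indexing is exactly getD)
def pvStepFib (s : List Int) : Int := s.getD (s.length - 1) 0 + s.getD (s.length - 2) 0
def pvStepPad (s : List Int) : Int := s.getD (s.length - 2) 0 + s.getD (s.length - 3) 0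
def pvStepJac (s : List Int) : Int := s.getD (s.length - 1) 0 + s.getD (s.length - 2) 0 * 2
def pvStepPel (s : List Int) : Int := s.getD (s.length - 1) 0 * 2 + s.getD (s.length - 2) 0
def pvStepTri (s : List Int) : Int := s.getD (s.length - 1) 0 + s.getD (s.length - 2) 0 + s.getD (s.length - 3) 0
def pvStepTet (s : List Int) : Int := s.getD (s.length - 1) 0 + s.getD (s.length - 2) 0 + s.getD (s.length - 3) 0 + s.getD (s.length - 4) 0

-- the dict of six Sequence objects: per name (items, next)
structure PvAState where
  fib : List Int × Nat
  pad : List Int × Nat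
  jac : List Int × Nat
  pel : List Int × Nat
  tri : List Int × Nat
  tet : List Int × Nat
deriving Repr, DecidableEq

def pvAInit : PvAState :=
  ⟨([0, 1], 0), ([1, 0, 0], 0), ([0, 1], 0), ([0, 1], 0), ([0, 0, 1], 0), ([0, 0, 0, 1], 0)⟩

-- dict[nm].getValue(); an invalid name raises KeyError in Python (outside Pre_),
-- the port returns (0, st) there
def pvAGet (st : PvAState) (nm : String) : Int × PvAState :=
  if nm = "fib" then
    let items := pvGrow pvStepFib st.fib.1 st.fib.2
    (items.getD st.fib.2 0, { st with fib := (items, st.fib.2 + 1) })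
  else if nm = "pad" then
    let items := pvGrow pvStepPad st.pad.1 st.pad.2
    (items.getD st.pad.2 0, { st with pad := (items, st.pad.2 + 1) })
  else if nm = "jac" then
    let items := pvGrow pvStepJac st.jac.1 st.jac.2
    (items.getD st.jac.2 0, { st with jac := (items, st.jac.2 + 1) })
  else if nm = "pel" then
    let items := pvGrow pvStepPel st.pel.1 st.pel.2
    (items.getD st.pel.2 0, { st with pel := (items, st.pel.2 + 1) })
  else if nm = "tri" then
    let items := pvGrow pvStepTri st.tri.1 st.tri.2
    (items.getD st.tri.2 0, { st with tri := (items, st.tri.2 + 1) })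
  else if nm = "tet" then
    let items := pvGrow pvStepTet st.tet.1 st.tet.2
    (items.getD st.tet.2 0, { st with tet := (items, st.tet.2 + 1) })
  else (0, st)

def mixbonacci (pattern : List String) (length : Int) : List Int :=
  if pattern.length = 0 ∨ length = 0 then []
  else
    ((PySem.List.pyRange 0 length 1).foldl
      (fun (acc : List Int × PvAState) i =>
        let nm := PySem.List.pyGetD pattern (PySem.Int.mod i (pattern.length : Int)) ""
        let r := pvAGet acc.2 nm
        (acc.1 ++ [r.1], r.2))
      ([], pvAInit)).1

-- ===== PORT B =====

-- SPECS: per name, (starter, coefficients over the last len(coeffs) terms)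
def pvSpec (nm : String) : Option (List Int × List Int) :=
  if nm = "fib" then some ([0, 1], [1, 1])
  else if nm = "pad" then some ([1, 0, 0], [0, 1, 1])
  else if nm = "jac" then some ([0, 1], [1, 2])
  else if nm = "pel" then some ([0, 1], [2, 1])
  else if nm = "tri" then some ([0, 0, 1], [1, 1, 1])
  else if nm = "tet" then some ([0, 0, 0, 1], [1, 1, 1, 1])
  else none

-- sum(c * seq[-1-j] for j, c in enumerate(coeffs)); seq[-1-j] ported as getD,
-- in range at every reachable call
def pvDot (coeffs seq : List Int) : Int :=
  (coeffs.zipIdx.map (fun cj => cj.1 * seq.getD (seq.length - 1 - cj.2) 0)).sum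

-- the while-loop of _terms
def pvGenGrow (coeffs seq : List Int) (cnt : Int) : List Int :=
  if (seq.length : Int) < cnt then pvGenGrow coeffs (seq ++ [pvDot coeffs seq]) cnt else seq
termination_by (cnt - seq.length).toNat
decreasing_by simp; omega

-- _terms(start, coeffs, cnt); seq[:cnt] with cnt ≥ 1 at every reachable call is take
def pvTerms (start coeffs : List Int) (cnt : Int) : List Int :=
  (pvGenGrow coeffs start cnt).take cnt.toNat

def mixbonacci_alt (pattern : List String) (length : Int) : List Int :=
  if pattern.length = 0 ∨ length ≤ 0 then []
  else
    let names := (PySem.List.pyRange 0 length 1).map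
      (fun i => PySem.List.pyGetD pattern (PySem.Int.mod i (pattern.length : Int)) "")
    let need := names.foldl (fun (d : PySem.Dict String Int) nm => d.insert nm (d.getD nm 0 + 1)) PySem.Dict.empty
    -- SPECS[nm] raises KeyError on an invalid name (outside Pre_); port uses []
    let table := need.items.foldl
      (fun (t : PySem.Dict String (List Int)) p =>
        t.insert p.1 (match pvSpec p.1 with
          | some sc => pvTerms sc.1 sc.2 p.2
          | none => [])) PySem.Dict.empty
    let used0 := need.keys.foldl (fun (d : PySem.Dict String Int) nm => d.insert nm 0) PySem.Dict.empty
    (names.foldl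
      (fun (acc : List Int × PySem.Dict String Int) nm =>
        let k := acc.2.getD nm 0
        -- table[nm][k]: in range at every reachable call, ported as getD
        (acc.1 ++ [(table.getD nm []).getD k.toNat 0], acc.2.insert nm (k + 1)))
      ([], used0)).1

-- ===== PRECONDITION & SPEC =====

-- Pre_ excludes exactly the inputs where A raises KeyError: a name actually
-- used (one of the first min(length, len(pattern)) entries) that is not one of
-- the six sequence names.
def Pre_mixbonacci (pattern : List String) (length : Int) : Prop :=
  ∀ s ∈ pattern.take length.toNat, s ∈ (["fib", "pad", "jac", "pel", "tri", "tet"] : List String)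

instance (pattern : List String) (length : Int) : Decidable (Pre_mixbonacci pattern length) := by
  unfold Pre_mixbonacci; infer_instance

def pvWitness_mixbonacci : List String × Int := (["fib", "tri", "jac"], 9)

def Spec_mixbonacci (pattern : List String) (length : Int) (out : List Int) : Prop :=
  out = mixbonacci_alt pattern length
instance (pattern : List String) (length : Int) (out : List Int) : Decidable (Spec_mixbonacci pattern length out) := by
  unfold Spec_mixbonacci; infer_instance

-- ===== CLAIM (what is proved, stated in full; the proofs are below) =====
def Claim_equal_mixbonacci : Prop := ∀ (pattern : List String) (length : Int), Dom_mixbonacci pattern length → Pre_mixbonacci pattern length → Spec_mixbonacci pattern length (mixbonacci pattern length)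

-- ===== LEMMAS AND PROOFS =====

-- canonical extension: append f of the current list, k times
def pvExt (f : List Int → Int) (s : List Int) : Nat → List Int
  | 0 => s
  | k + 1 => pvExt f s k ++ [f (pvExt f s k)]

theorem pvExt_length (f : List Int → Int) (s : List Int) (k : Nat) :
    (pvExt f s k).length = s.length + k := by
  induction k with
  | zero => rfl
  | succ k ih => simp [pvExt, ih]; omega

theorem pvExt_shift (f : List Int → Int) (s : List Int) (k : Nat) :
    pvExt f (s ++ [f s]) k = pvExt f s (k + 1) := by
  induction k with
  | zero => rfl
  | succ k ih => simp only [pvExt, ih]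

theorem pvExt_append (f : List Int → Int) (s : List Int) (a b : Nat) :
    pvExt f s (a + b) = pvExt f (pvExt f s a) b := by
  induction b with
  | zero => rfl
  | succ b ih => rw [Nat.add_succ]; simp only [pvExt, ih]

theorem pvExt_congr (f g : List Int → Int) (h : ∀ t, f t = g t) (s : List Int) (k : Nat) :
    pvExt f s k = pvExt g s k := by
  induction k with
  | zero => rfl
  | succ k ih => simp only [pvExt, ih, h]

theorem pvExt_getD_stable (f : List Int → Int) (t : List Int) (l i : Nat) (h : i < t.length) :
    (pvExt f t l).getD i 0 = t.getD i 0 := by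
  induction l with
  | zero => rfl
  | succ l ih =>
      have hlen : i < (pvExt f t l).length := by rw [pvExt_length]; omega
      simp only [pvExt]
      rw [List.getD_eq_getElem?_getD, List.getElem?_append_left hlen,
        ← List.getD_eq_getElem?_getD, ih]

theorem pvGrow_eq_ext (f : List Int → Int) (items : List Int) (next : Nat) :
    pvGrow f items next = pvExt f items (next + 1 - items.length) := by
  fun_induction pvGrow f items next with
  | case1 items h ih =>
      have : next + 1 - items.length = (next + 1 - (items ++ [f items]).length) + 1 := by
        simp; omega
      rw [ih, this, ← pvExt_shift]
  | case2 items h =>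
      have : next + 1 - items.length = 0 := by omega
      rw [this]; rfl

theorem pvGenGrow_eq_ext (coeffs seq : List Int) (cnt : Int) :
    pvGenGrow coeffs seq cnt = pvExt (pvDot coeffs) seq (cnt - seq.length).toNat := by
  fun_induction pvGenGrow coeffs seq cnt with
  | case1 seq h ih =>
      have : (cnt - seq.length).toNat = ((cnt - (seq ++ [pvDot coeffs seq]).length).toNat) + 1 := by
        simp; omega
      rw [ih, this, ← pvExt_shift]
  | case2 seq h =>
      have : (cnt - seq.length).toNat = 0 := by omega
      rw [this]; rfl

-- the canonical k-th term of the sequence with step f and starter s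
def pvVal (f : List Int → Int) (s : List Int) (k : Nat) : Int :=
  (pvExt f s (k + 1 - s.length)).getD k 0

-- key growth step: growing a canonical state to serve index c yields the
-- canonical list for c+1
theorem pvGrow_canonical (f : List Int → Int) (s : List Int) (b c : Nat)
    (hb : s.length = b) :
    pvGrow f (pvExt f s (c - b)) c = pvExt f s (c + 1 - b) := by
  subst hb
  rw [pvGrow_eq_ext, pvExt_length, ← pvExt_append]
  congr 1
  omega

-- name table used by the specification run
def pvFOf (nm : String) : List Int → Int :=
  if nm = "fib" then pvStepFib else if nm = "pad" then pvStepPad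
  else if nm = "jac" then pvStepJac else if nm = "pel" then pvStepPel
  else if nm = "tri" then pvStepTri else pvStepTet

def pvStartOf (nm : String) : List Int :=
  if nm = "fib" then [0, 1] else if nm = "pad" then [1, 0, 0]
  else if nm = "jac" then [0, 1] else if nm = "pel" then [0, 1]
  else if nm = "tri" then [0, 0, 1] else [0, 0, 0, 1]

def pvValid (nm : String) : Prop :=
  nm ∈ (["fib", "pad", "jac", "pel", "tri", "tet"] : List String)

def pvBump (c : String → Nat) (nm : String) : String → Nat :=
  fun x => if x = nm then c nm + 1 else c x

-- the common specification of both runs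
def pvSpecRun (c : String → Nat) : List String → List Int
  | [] => []
  | nm :: rest => pvVal (pvFOf nm) (pvStartOf nm) (c nm) :: pvSpecRun (pvBump c nm) rest

-- ---- A-side ----

def pvMkState (c : String → Nat) : PvAState :=
  ⟨(pvExt pvStepFib [0, 1] (c "fib" - 2), c "fib"),
   (pvExt pvStepPad [1, 0, 0] (c "pad" - 3), c "pad"),
   (pvExt pvStepJac [0, 1] (c "jac" - 2), c "jac"),
   (pvExt pvStepPel [0, 1] (c "pel" - 2), c "pel"),
   (pvExt pvStepTri [0, 0, 1] (c "tri" - 3), c "tri"),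
   (pvExt pvStepTet [0, 0, 0, 1] (c "tet" - 4), c "tet")⟩

theorem pvAGet_step (c : String → Nat) (nm : String) (hv : pvValid nm) :
    pvAGet (pvMkState c) nm
      = (pvVal (pvFOf nm) (pvStartOf nm) (c nm), pvMkState (pvBump c nm)) := by
  simp only [pvValid, List.mem_cons, List.not_mem_nil, or_false] at hv
  rcases hv with h | h | h | h | h | h <;> subst h <;>
    simp only [pvAGet, pvMkState, pvFOf, pvStartOf, pvBump, String.reduceEq, reduceIte]
  · rw [pvGrow_canonical pvStepFib [0, 1] 2 (c "fib") rfl]; rfl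
  · rw [pvGrow_canonical pvStepPad [1, 0, 0] 3 (c "pad") rfl]; rfl
  · rw [pvGrow_canonical pvStepJac [0, 1] 2 (c "jac") rfl]; rfl
  · rw [pvGrow_canonical pvStepPel [0, 1] 2 (c "pel") rfl]; rfl
  · rw [pvGrow_canonical pvStepTri [0, 0, 1] 3 (c "tri") rfl]; rfl
  · rw [pvGrow_canonical pvStepTet [0, 0, 0, 1] 4 (c "tet") rfl]; rfl

theorem pvA_run (names : List String) (c : String → Nat) (acc : List Int)
    (hval : ∀ nm ∈ names, pvValid nm) :
    (names.foldl (fun (a : List Int × PvAState) nm =>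
        let r := pvAGet a.2 nm; (a.1 ++ [r.1], r.2)) (acc, pvMkState c)).1
      = acc ++ pvSpecRun c names := by
  induction names generalizing c acc with
  | nil => simp [pvSpecRun]
  | cons nm rest ih =>
      have hv : pvValid nm := hval nm (by simp)
      simp only [List.foldl_cons, pvAGet_step c nm hv]
      rw [ih (pvBump c nm) _ (fun x hx => hval x (by simp [hx]))]
      simp [pvSpecRun]

-- ---- B-side ----

theorem pvDot_eq (nm : String) (hv : pvValid nm) (sc : List Int × List Int)
    (hs : pvSpec nm = some sc) (t : List Int) :
    pvDot sc.2 t = pvFOf nm t := by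
  simp only [pvValid, List.mem_cons, List.not_mem_nil, or_false] at hv
  rcases hv with h | h | h | h | h | h <;> subst h <;>
    simp only [pvSpec, String.reduceEq, reduceIte, Option.some.injEq] at hs <;> subst hs <;>
    simp [pvDot, pvFOf, pvStepFib, pvStepPad, pvStepJac, pvStepPel, pvStepTri, pvStepTet,
      List.zipIdx, Nat.sub_sub] <;> try ring

theorem pvSpec_start (nm : String) (hv : pvValid nm) (sc : List Int × List Int)
    (hs : pvSpec nm = some sc) : sc.1 = pvStartOf nm := by
  simp only [pvValid, List.mem_cons, List.not_mem_nil, or_false] at hv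
  rcases hv with h | h | h | h | h | h <;> subst h <;>
    simp only [pvSpec, String.reduceEq, reduceIte, Option.some.injEq] at hs <;> subst hs <;> rfl

-- element k of the precomputed table equals the canonical k-th term
theorem pvTerms_getD (nm : String) (hv : pvValid nm) (sc : List Int × List Int)
    (hs : pvSpec nm = some sc) (cnt : Nat) (k : Nat) (hk : k < cnt) :
    (pvTerms sc.1 sc.2 (cnt : Int)).getD k 0 = pvVal (pvFOf nm) (pvStartOf nm) k := by
  have hstart := pvSpec_start nm hv sc hs
  have hdot := pvDot_eq nm hv sc hs
  unfold pvTerms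
  rw [pvGenGrow_eq_ext]
  rw [pvExt_congr _ _ hdot]
  have h1 : ((cnt : Int) - sc.1.length).toNat = cnt - sc.1.length := by omega
  have h2 : (cnt : Int).toNat = cnt := by omega
  rw [h1, h2, hstart]
  set s := pvStartOf nm
  have hsplit : cnt - s.length = (k + 1 - s.length) + ((cnt - s.length) - (k + 1 - s.length)) := by omega
  rw [List.getD_eq_getElem?_getD, List.getElem?_take_of_lt hk, ← List.getD_eq_getElem?_getD]
  rw [hsplit, pvExt_append]
  rw [pvExt_getD_stable _ _ _ _ (by rw [pvExt_length]; omega)]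
  rfl

theorem pvB_run (names : List String) (T : String → List Int)
    (hT : ∀ nm ∈ names, ∀ k, k < names.count nm →
        (T nm).getD k 0 = pvVal (pvFOf nm) (pvStartOf nm) k) :
    ∀ (suffix processed : List String) (used : PySem.Dict String Int) (acc : List Int),
    names = processed ++ suffix →
    (∀ nm, used.getD nm 0 = (processed.count nm : Int)) →
    (suffix.foldl
      (fun (a : List Int × PySem.Dict String Int) nm =>
        (a.1 ++ [(T nm).getD (a.2.getD nm 0).toNat 0], a.2.insert nm (a.2.getD nm 0 + 1)))
      (acc, used)).1 = acc ++ pvSpecRun (fun nm => processed.count nm) suffix := by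
  intro suffix
  induction suffix with
  | nil => intro processed used acc _ _; simp [pvSpecRun]
  | cons nm rest ih =>
      intro processed used acc hsplit hused
      have hmem : nm ∈ names := by rw [hsplit]; simp
      have hcnt : processed.count nm < names.count nm := by
        rw [hsplit, List.count_append, List.count_cons]; simp
      simp only [List.foldl_cons]
      rw [ih (processed ++ [nm]) _ _ (by rw [hsplit]; simp)
        (by
          intro x
          rw [PySem.Dict.getD_insert, List.count_append]
          by_cases hx : x = nm
          · subst hx
            rw [if_pos rfl, hused]
            simp
          · rw [if_neg hx, hused]
            simp [List.count_singleton]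
            exact fun h => hx h.symm)]
      rw [hused nm]
      rw [show ((processed.count nm : Int)).toNat = processed.count nm by omega]
      rw [hT nm hmem _ hcnt]
      have : pvSpecRun (fun x => processed.count x) (nm :: rest)
          = pvVal (pvFOf nm) (pvStartOf nm) (processed.count nm)
            :: pvSpecRun (pvBump (fun x => processed.count x) nm) rest := rfl
      rw [this]
      have hb : pvBump (fun x => processed.count x) nm = fun x => (processed ++ [nm]).count x := by
        funext x
        by_cases hx : x = nm
        · subst hx; simp [pvBump, List.count_append]
        · simp [pvBump, hx, List.count_append, List.count_singleton]
          exact fun h => hx h.symm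
      rw [hb]
      simp

theorem pvUsed0 (l : List String) :
    ∀ (d : PySem.Dict String Int), (∀ x, d.getD x 0 = 0) →
      ∀ x, (l.foldl (fun (d : PySem.Dict String Int) nm => d.insert nm 0) d).getD x 0 = 0 := by
  induction l with
  | nil => intro d hd x; exact hd x
  | cons nm rest ih =>
      intro d hd x
      refine ih _ (fun y => ?_) x
      rw [PySem.Dict.getD_insert]
      by_cases hy : y = nm
      · rw [if_pos hy]
      · rw [if_neg hy]; exact hd y

-- table[nm] is the needed-count prefix of nm's sequence
theorem pvTable_fact (names : List String) (nm : String) (hmem : nm ∈ names) :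
    ((names.foldl (fun (d : PySem.Dict String Int) nm => d.insert nm (d.getD nm 0 + 1)) PySem.Dict.empty).items.foldl
      (fun (t : PySem.Dict String (List Int)) p =>
        t.insert p.1 (match pvSpec p.1 with
          | some sc => pvTerms sc.1 sc.2 p.2
          | none => [])) PySem.Dict.empty).getD nm []
    = (match pvSpec nm with
        | some sc => pvTerms sc.1 sc.2 (names.count nm : Int)
        | none => []) := by
  rw [PySem.Dict.foldl_insert_getD_add_one_eq_counter]
  have hfresh : ∀ p ∈ (PySem.Dict.counter names).items,
      (PySem.Dict.empty : PySem.Dict String (List Int)).contains p.1 = false :=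
    fun p _ => PySem.Dict.contains_empty p.1
  have hnodup : ((PySem.Dict.counter names).items.map Prod.fst).Nodup :=
    PySem.Dict.nodup_keys_counter names
  have hitems := PySem.Dict.items_foldl_insert_fresh (PySem.Dict.counter names).items
    Prod.fst (fun p => match pvSpec p.1 with
        | some sc => pvTerms sc.1 sc.2 p.2
        | none => []) PySem.Dict.empty hfresh hnodup
  set tbl := (PySem.Dict.counter names).items.foldl
      (fun (t : PySem.Dict String (List Int)) p =>
        t.insert p.1 (match pvSpec p.1 with
          | some sc => pvTerms sc.1 sc.2 p.2
          | none => [])) PySem.Dict.empty with htbl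
  have hkeysnd : tbl.keys.Nodup := by
    have : tbl.keys = (PySem.Dict.counter names).items.map Prod.fst := by
      show tbl.items.map Prod.fst = _
      rw [hitems]
      have he : (PySem.Dict.empty : PySem.Dict String (List Int)).items = [] := rfl
      rw [he, List.nil_append, List.map_map]
      simp [Function.comp_def]
    rw [this]; exact hnodup
  have hpair : (nm, (match pvSpec nm with
        | some sc => pvTerms sc.1 sc.2 (names.count nm : Int)
        | none => [])) ∈ tbl.items := by
    rw [hitems]
    have he : (PySem.Dict.empty : PySem.Dict String (List Int)).items = [] := rfl
    rw [he, List.nil_append, PySem.Dict.items_counter, List.map_map]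
    exact List.mem_map.2 ⟨nm, (PySem.Set.mem_ofList names nm).2 hmem, rfl⟩
  exact PySem.Dict.getD_of_mem_items tbl hpair hkeysnd []

-- every name used inside Pre_'s guard is one of the six
theorem pvNames_valid (pattern : List String) (length : Int)
    (hpre : Pre_mixbonacci pattern length) (hlen : 0 < (pattern.length : Int)) (nm : String)
    (hmem : nm ∈ (PySem.List.pyRange 0 length 1).map
      (fun i => PySem.List.pyGetD pattern (PySem.Int.mod i (pattern.length : Int)) "")) :
    pvValid nm := by
  simp only [List.mem_map] at hmem
  obtain ⟨i, hi, rfl⟩ := hmem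
  rw [PySem.List.mem_pyRange_one] at hi
  have h0 : (0 : Int) ≤ PySem.Int.mod i (pattern.length : Int) := PySem.Int.mod_nonneg i hlen
  have h1 : PySem.Int.mod i (pattern.length : Int) < (pattern.length : Int) := PySem.Int.mod_lt i hlen
  rw [PySem.List.pyGetD_eq_getElem pattern "" h0 h1]
  set j := (PySem.Int.mod i (pattern.length : Int)).toNat with hj
  have hjlen : j < pattern.length := by omega
  have hjL : j < length.toNat := by
    by_cases hcase : i < (pattern.length : Int)
    · have : PySem.Int.mod i (pattern.length : Int) = i := by
        rw [PySem.Int.mod_eq_emod_of_pos hlen]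
        exact Int.emod_eq_of_lt hi.1 hcase
      omega
    · omega
  have hget : pattern[j] ∈ pattern.take length.toNat := by
    have hjt : j < (pattern.take length.toNat).length := by
      rw [List.length_take]; omega
    have := List.getElem_mem hjt
    rwa [List.getElem_take] at this
  exact hpre _ hget

theorem pvCount_nil (c : String → Nat) (h : c = fun nm => List.count nm ([] : List String)) :
    c = fun _ => 0 := by
  subst h; funext x; simp

-- ===== VERDICT (by name: the statement is the Claim_ definition above) =====
theorem mixbonacci_spec : Claim_equal_mixbonacci := by
  unfold Claim_equal_mixbonacci
  intro pattern length _ hpre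
  unfold Spec_mixbonacci mixbonacci mixbonacci_alt
  by_cases hp : pattern.length = 0
  · simp [hp]
  by_cases hz : length ≤ 0
  · by_cases h0 : length = 0
    · simp [h0]
    · rw [if_neg (by simp [hp, h0]), if_pos (Or.inr hz)]
      rw [PySem.List.pyRange_one_eq_nil (by omega)]
      rfl
  · -- main case: nonempty pattern, positive length
    rw [if_neg (by simp [hp]; omega), if_neg (by simp [hp]; omega)]
    have hlen : 0 < (pattern.length : Int) := by
      have := Nat.pos_of_ne_zero hp
      omega
    set names := (PySem.List.pyRange 0 length 1).map
      (fun i => PySem.List.pyGetD pattern (PySem.Int.mod i (pattern.length : Int)) "") with hnames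
    have hval : ∀ nm ∈ names, pvValid nm := fun nm h =>
      pvNames_valid pattern length hpre hlen nm (hnames ▸ h)
    -- A side: fold over the range with the inline name is the fold over names
    have hA : (PySem.List.pyRange 0 length 1).foldl
        (fun (acc : List Int × PvAState) i =>
          let nm := PySem.List.pyGetD pattern (PySem.Int.mod i (pattern.length : Int)) ""
          let r := pvAGet acc.2 nm
          (acc.1 ++ [r.1], r.2))
        ([], pvAInit)
        = names.foldl (fun (a : List Int × PvAState) nm =>
            let r := pvAGet a.2 nm; (a.1 ++ [r.1], r.2)) ([], pvAInit) := by
      rw [hnames, List.foldl_map]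
    rw [hA]
    have hinit : pvAInit = pvMkState (fun _ => 0) := rfl
    rw [hinit, pvA_run names (fun _ => 0) [] hval]
    -- B side
    have hT : ∀ nm ∈ names, ∀ k, k < names.count nm →
        ((((names.foldl (fun (d : PySem.Dict String Int) nm => d.insert nm (d.getD nm 0 + 1)) PySem.Dict.empty).items.foldl
          (fun (t : PySem.Dict String (List Int)) p =>
            t.insert p.1 (match pvSpec p.1 with
              | some sc => pvTerms sc.1 sc.2 p.2
              | none => [])) PySem.Dict.empty).getD nm [])).getD k 0
          = pvVal (pvFOf nm) (pvStartOf nm) k := by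
      intro nm hnm k hk
      rw [pvTable_fact names nm hnm]
      have hv := hval nm hnm
      have hsc : ∃ sc, pvSpec nm = some sc := by
        simp only [pvValid, List.mem_cons, List.not_mem_nil, or_false] at hv
        rcases hv with h | h | h | h | h | h <;> subst h <;> exact ⟨_, rfl⟩
      obtain ⟨sc, hsc⟩ := hsc
      rw [hsc]
      exact pvTerms_getD nm (hval nm hnm) sc hsc (names.count nm) k hk
    have hused0 : ∀ x, ((names.foldl (fun (d : PySem.Dict String Int) nm => d.insert nm (d.getD nm 0 + 1)) PySem.Dict.empty).keys.foldl
        (fun (d : PySem.Dict String Int) nm => d.insert nm 0) PySem.Dict.empty).getD x 0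
        = ((List.count x ([] : List String) : Int)) := by
      intro x
      rw [pvUsed0 _ PySem.Dict.empty (fun y => PySem.Dict.getD_empty y 0) x]
      simp
    rw [pvB_run names _ hT names [] _ [] rfl hused0]
    have : (fun nm => List.count nm ([] : List String)) = (fun _ => (0 : Nat)) :=
      pvCount_nil _ rfl
    rw [this]
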